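-- pv_equiv track=rewrite | github.com/devilshadow04/heyyy | codelearn/001. GroupedBits.py | groupedBits
-- ===== SOURCE A (Python) =====
-- def dec_to_bin(n):
--     if n == 0:
--         return '0'
--     if n == 1:
--         return '1'
--     else:
--         return str(dec_to_bin(n//2)) + str(n % 2)
--
-- def groupedBits(n):
--     bin = list(dec_to_bin(n))
--     count = 0
--
--     if n == 1:
--         count = 1
--     if n > 1:
--         if int(bin[0]) == 1:
--             count += 1
--         for i in range(len(bin)-1):
--             if int(bin[i]) == 0 and int(bin[i + 1]) == 1:
--                 count += 1
--     return count
-- ===== SOURCE B (Python) =====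
-- def groupedBits(n):
--     count = 0
--     while n:
--         if n & 1 and not (n >> 1) & 1:
--             count += 1
--         n >>= 1
--     return count
-- ===== Notes on version B (the rewrite author's own statement) =====
-- stated objective: alternative
-- what changed: B drops the recursive binary-string construction and the index-by-index 0-to-1 transition scan entirely and instead counts, in one bitwise while-loop over n itself, the positions where a set bit is followed by a clear bit (the top bit of each run of consecutive 1s).
import Mathlib
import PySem

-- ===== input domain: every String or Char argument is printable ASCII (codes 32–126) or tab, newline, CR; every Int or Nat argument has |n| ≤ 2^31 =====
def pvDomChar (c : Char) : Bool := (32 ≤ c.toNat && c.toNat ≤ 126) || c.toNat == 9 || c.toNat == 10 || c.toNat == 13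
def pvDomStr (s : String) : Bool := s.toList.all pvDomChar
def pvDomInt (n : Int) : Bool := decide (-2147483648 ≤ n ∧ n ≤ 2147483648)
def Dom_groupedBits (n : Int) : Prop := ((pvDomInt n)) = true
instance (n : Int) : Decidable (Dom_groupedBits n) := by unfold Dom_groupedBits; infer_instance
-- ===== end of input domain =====

-- B replaces A's recursive binary-string construction and 0→1 transition scan by a direct
-- bitwise loop counting the top bit of each run of consecutive 1s (objective: alternative — no string is built).

-- ===== PORT A =====
-- dec_to_bin: builds the binary string by recursion on n//2.  For n < 0 the Python recursion
-- never terminates (RecursionError); the `n < 0` branch is only a totality guard, unreachable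
-- under Pre_ (such n are excluded there).
def decToBin (n : Int) : List Char :=
  if n = 0 then ['0']
  else if n = 1 then ['1']
  else if n < 0 then []
  else decToBin (PySem.Int.floordiv n 2) ++ PySem.Int.toChars (PySem.Int.mod n 2)
termination_by n.toNat
decreasing_by
  rename_i h0 h1 h2
  rw [PySem.Int.floordiv_eq_ediv_of_pos (by omega)]
  omega

-- int(bin[i]) on a one-character string; bin holds only digit chars, so the .getD 0 fallback
-- (Python's ValueError) is unreachable on the scanned strings.
def cInt (c : Char) : Int := (PySem.Int.ofChars? [c]).getD 0

-- the `for i in range(len(bin)-1)` transition loop of A, on the fixed list s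
def aLoop (s : List Char) (init : Int) : Int :=
  (List.range (s.length - 1)).foldl
    (fun (count : Int) (i : Nat) =>
      if cInt (PySem.List.pyGetD s (i : Int) ' ') = 0 ∧
         cInt (PySem.List.pyGetD s ((i : Int) + 1) ' ') = 1
      then count + 1 else count) init

-- A's two `if n == 1` / `if n > 1` tests are mutually exclusive, transcribed as the if-chain.
-- Indexing uses pyGetD with an unreachable default: every scanned index is in range.
def groupedBits (n : Int) : Int :=
  let bin := decToBin n
  if n = 1 then 1
  else if 1 < n then
    aLoop bin (if cInt (PySem.List.pyGetD bin 0 ' ') = 1 then 1 else 0)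
  else 0

-- ===== PORT B =====
-- the `while n:` loop of Source B; `n & 1` truthy ↔ n % 2 ≠ 0, `(n >> 1) & 1` falsy ↔ (n//2) % 2 = 0
-- (>> 1 is exactly floor division by 2).  For n < 0 the Python loop never terminates; the
-- `n < 0` branch is only a totality guard, unreachable under Pre_.
def altLoop (n : Int) (count : Int) : Int :=
  if n = 0 then count
  else if n < 0 then count
  else altLoop (PySem.Int.floordiv n 2)
    (if PySem.Int.mod n 2 ≠ 0 ∧ PySem.Int.mod (PySem.Int.floordiv n 2) 2 = 0
     then count + 1 else count)
termination_by n.toNat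
decreasing_by
  rename_i h0 h1
  rw [PySem.Int.floordiv_eq_ediv_of_pos (by omega)]
  omega

def groupedBits_alt (n : Int) : Int := altLoop n 0

-- ===== PRECONDITION & SPEC =====
-- Pre_ excludes n < 0, on which BOTH Pythons diverge (A: infinite recursion in dec_to_bin,
-- B: `while n` with n >> 1 stuck at -1); A returns on every n ≥ 0.
def Pre_groupedBits (n : Int) : Prop := 0 ≤ n
instance (n : Int) : Decidable (Pre_groupedBits n) := by unfold Pre_groupedBits; infer_instance
def pvWitness_groupedBits : Int := (5)
def Spec_groupedBits (n : Int) (out : Int) : Prop := out = groupedBits_alt n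
instance (n : Int) (out : Int) : Decidable (Spec_groupedBits n out) := by unfold Spec_groupedBits; infer_instance

-- ===== CLAIM (what is proved, stated in full; the proofs are below) =====
def Claim_equal_groupedBits : Prop := ∀ (n : Int), Dom_groupedBits n → Pre_groupedBits n → Spec_groupedBits n (groupedBits n)

-- ===== LEMMAS AND PROOFS =====

-- the digit appended by dec_to_bin
theorem toChars_mod_two (n : Int) (_h : 0 ≤ n) :
    PySem.Int.toChars (PySem.Int.mod n 2) =
      [if PySem.Int.mod n 2 = 1 then '1' else '0'] := by
  rw [PySem.Int.mod_eq_emod_of_pos (by omega)]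
  have h2 : n % 2 = 0 ∨ n % 2 = 1 := by omega
  rcases h2 with h2 | h2 <;> rw [h2] <;> decide

theorem decToBin_ne_nil (n : Int) (h : 0 ≤ n) : decToBin n ≠ [] := by
  rw [decToBin]
  split_ifs with h0 h1 h2
  · simp
  · simp
  · omega
  · rw [toChars_mod_two n h]; simp

-- unfolding dec_to_bin for n ≥ 2
theorem decToBin_step (n : Int) (h : 2 ≤ n) :
    decToBin n = decToBin (PySem.Int.floordiv n 2) ++
      [if PySem.Int.mod n 2 = 1 then '1' else '0'] := by
  conv_lhs => rw [decToBin]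
  rw [if_neg (show ¬n = 0 by omega), if_neg (show ¬n = 1 by omega),
      if_neg (show ¬n < 0 by omega), toChars_mod_two n (by omega)]

theorem decToBin_head (n : Int) (h : 1 ≤ n) :
    PySem.List.pyGetD (decToBin n) 0 ' ' = '1' := by
  have key : ∀ k : Nat, ∀ n : Int, 1 ≤ n → n.toNat = k →
      PySem.List.pyGetD (decToBin n) 0 ' ' = '1' := by
    intro k
    induction k using Nat.strong_induction_on with
    | _ k ih =>
      intro n h1 hk
      by_cases hone : n = 1
      · subst hone; rw [decToBin]; decide
      have h2 : 2 ≤ n := by omega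
      rw [decToBin_step n h2]
      have hm : 1 ≤ PySem.Int.floordiv n 2 := by
        rw [PySem.Int.floordiv_eq_ediv_of_pos (by omega)]; omega
      have hlt : (PySem.Int.floordiv n 2).toNat < k := by
        rw [PySem.Int.floordiv_eq_ediv_of_pos (by omega)]; omega
      have hih := ih _ hlt (PySem.Int.floordiv n 2) hm rfl
      have hne := decToBin_ne_nil (PySem.Int.floordiv n 2) (by omega)
      rw [PySem.List.pyGetD_zero] at hih ⊢
      simp only [List.getD_eq_getElem?_getD] at hih ⊢
      rwa [List.getElem?_append_left (by
        have := List.length_pos_iff.mpr hne; omega)]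
  exact key n.toNat n h rfl

theorem decToBin_last (n : Int) (h : 0 ≤ n) :
    (decToBin n).getLast? = some (if PySem.Int.mod n 2 = 1 then '1' else '0') := by
  by_cases h0 : n = 0
  · subst h0
    have hm : PySem.Int.mod (0 : Int) 2 = 0 := by
      rw [PySem.Int.mod_eq_emod_of_pos (by omega)]; decide
    rw [decToBin, hm]; decide
  by_cases h1 : n = 1
  · subst h1
    have hm : PySem.Int.mod (1 : Int) 2 = 1 := by
      rw [PySem.Int.mod_eq_emod_of_pos (by omega)]; decide
    rw [decToBin, hm]; decide
  rw [decToBin_step n (by omega), List.getLast?_concat]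

theorem cInt_one : cInt '1' = 1 := by decide
theorem cInt_zero : cInt '0' = 0 := by decide

-- splitting off the last index of A's transition loop
theorem aLoop_concat (s : List Char) (b c : Char) (hs : s.getLast? = some c) (init : Int) :
    aLoop (s ++ [b]) init =
      (if cInt c = 0 ∧ cInt b = 1 then aLoop s init + 1 else aLoop s init) := by
  have hne : s ≠ [] := by intro hnil; rw [hnil] at hs; simp at hs
  have hlen : 1 ≤ s.length := List.length_pos_iff.mpr hne
  unfold aLoop
  have hL : (s ++ [b]).length - 1 = (s.length - 1) + 1 := by simp; omega
  rw [hL, List.range_succ, List.foldl_append]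
  have hpre : ∀ (acc : Int), ∀ i ∈ List.range (s.length - 1),
      (if cInt (PySem.List.pyGetD (s ++ [b]) (i : Int) ' ') = 0 ∧
          cInt (PySem.List.pyGetD (s ++ [b]) ((i : Int) + 1) ' ') = 1
       then acc + 1 else acc) =
      (if cInt (PySem.List.pyGetD s (i : Int) ' ') = 0 ∧
          cInt (PySem.List.pyGetD s ((i : Int) + 1) ' ') = 1
       then acc + 1 else acc) := by
    intro acc i hi
    rw [List.mem_range] at hi
    have g1 : PySem.List.pyGetD (s ++ [b]) (i : Int) ' ' = PySem.List.pyGetD s (i : Int) ' ' := by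
      rw [PySem.List.pyGetD_natCast, PySem.List.pyGetD_natCast]
      simp only [List.getD_eq_getElem?_getD]
      rw [List.getElem?_append_left (by omega)]
    have g2 : PySem.List.pyGetD (s ++ [b]) ((i : Int) + 1) ' '
        = PySem.List.pyGetD s ((i : Int) + 1) ' ' := by
      have hcast : ((i : Int) + 1) = ((i + 1 : Nat) : Int) := by push_cast; ring
      rw [hcast, PySem.List.pyGetD_natCast, PySem.List.pyGetD_natCast]
      simp only [List.getD_eq_getElem?_getD]
      rw [List.getElem?_append_left (by omega)]
    rw [g1, g2]
  -- the final index s.length - 1 reads the old last char and the new char b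
  have e1 : PySem.List.pyGetD (s ++ [b]) (((s.length - 1 : Nat) : Int)) ' ' = c := by
    rw [PySem.List.pyGetD_natCast]
    simp only [List.getD_eq_getElem?_getD]
    rw [List.getElem?_append_left (by omega)]
    rw [List.getLast?_eq_getElem?] at hs
    simp [hs]
  have e2 : PySem.List.pyGetD (s ++ [b]) (((s.length - 1 : Nat) : Int) + 1) ' ' = b := by
    have hcast : (((s.length - 1 : Nat) : Int) + 1) = ((s.length : Nat) : Int) := by
      push_cast [hlen]; omega
    rw [hcast, PySem.List.pyGetD_natCast]
    simp only [List.getD_eq_getElem?_getD]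
    rw [List.getElem?_append_right (by omega)]
    simp
  simp only [List.foldl_cons, List.foldl_nil]
  rw [e1, e2]
  have hcong : (List.range (s.length - 1)).foldl
      (fun (count : Int) (i : Nat) =>
        if cInt (PySem.List.pyGetD (s ++ [b]) (i : Int) ' ') = 0 ∧
           cInt (PySem.List.pyGetD (s ++ [b]) ((i : Int) + 1) ' ') = 1
        then count + 1 else count) init =
      (List.range (s.length - 1)).foldl
      (fun (count : Int) (i : Nat) =>
        if cInt (PySem.List.pyGetD s (i : Int) ' ') = 0 ∧
           cInt (PySem.List.pyGetD s ((i : Int) + 1) ' ') = 1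
        then count + 1 else count) init :=
    PySem.List.foldl_congr_mem _ _ _ _ (fun acc i hi => hpre acc i hi)
  rw [hcong]

-- for n ≥ 1 the leading digit is 1, so A's value is the transition loop started at 1
theorem groupedBits_pos (n : Int) (h : 1 ≤ n) :
    groupedBits n = aLoop (decToBin n) 1 := by
  by_cases h1 : n = 1
  · subst h1
    have hd : decToBin 1 = ['1'] := by rw [decToBin]; norm_num
    simp [groupedBits, hd, aLoop]
  · simp only [groupedBits]
    rw [if_neg h1, if_pos (show 1 < n by omega), decToBin_head n h, cInt_one, if_pos rfl]

theorem A_rec (n : Int) (h : 2 ≤ n) :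
    groupedBits n = groupedBits (PySem.Int.floordiv n 2) +
      (if PySem.Int.mod n 2 = 1 ∧ PySem.Int.mod (PySem.Int.floordiv n 2) 2 = 0
       then 1 else 0) := by
  have hm : 1 ≤ PySem.Int.floordiv n 2 := by
    rw [PySem.Int.floordiv_eq_ediv_of_pos (by omega)]; omega
  rw [groupedBits_pos n (by omega), groupedBits_pos _ hm]
  rw [decToBin_step n h,
      aLoop_concat _ _ _ (decToBin_last (PySem.Int.floordiv n 2) (by omega)) 1]
  have ef : PySem.Int.floordiv n 2 = n / 2 := PySem.Int.floordiv_eq_ediv_of_pos (by omega)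
  have em : PySem.Int.mod n 2 = n % 2 := PySem.Int.mod_eq_emod_of_pos (by omega)
  have em2 : PySem.Int.mod (PySem.Int.floordiv n 2) 2 = PySem.Int.floordiv n 2 % 2 :=
    PySem.Int.mod_eq_emod_of_pos (by omega)
  rw [em, em2, ef]
  have h1 : n % 2 = 0 ∨ n % 2 = 1 := by omega
  have h2 : n / 2 % 2 = 0 ∨ n / 2 % 2 = 1 := by omega
  rcases h1 with h1 | h1 <;> rcases h2 with h2 | h2 <;>
    simp [h1, h2, cInt_zero, cInt_one]

-- the terminal cases of B's loop
theorem altLoop_zero (n : Int) (h : n = 0 ∨ n < 0) : altLoop n 0 = 0 := by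
  rw [altLoop]
  rcases h with h | h
  · rw [if_pos h]
  · by_cases h0 : n = 0
    · rw [if_pos h0]
    · rw [if_neg h0, if_pos h]

-- the accumulator of B's loop is additive
theorem altLoop_acc (n : Int) (c : Int) : altLoop n c = c + altLoop n 0 := by
  have key : ∀ k : Nat, ∀ n : Int, n.toNat = k → ∀ c : Int,
      altLoop n c = c + altLoop n 0 := by
    intro k
    induction k using Nat.strong_induction_on with
    | _ k ih =>
      intro n hk c
      by_cases h0 : n = 0
      · conv_lhs => rw [altLoop]
        rw [if_pos h0, altLoop_zero n (Or.inl h0)]; ring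
      by_cases h1 : n < 0
      · conv_lhs => rw [altLoop]
        rw [if_neg h0, if_pos h1, altLoop_zero n (Or.inr h1)]; ring
      have hlt : (PySem.Int.floordiv n 2).toNat < k := by
        rw [PySem.Int.floordiv_eq_ediv_of_pos (by omega)]; omega
      have ihr := ih _ hlt (PySem.Int.floordiv n 2) rfl
      conv_lhs => rw [altLoop]
      conv_rhs => rw [altLoop]
      rw [if_neg h0, if_neg h1, if_neg h0, if_neg h1]
      split_ifs with hcond
      · rw [ihr (c + 1), ihr (0 + 1)]; ring
      · rw [ihr c]
  exact key n.toNat n rfl c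

theorem B_rec (n : Int) (h : 1 ≤ n) :
    groupedBits_alt n =
      (if PySem.Int.mod n 2 = 1 ∧ PySem.Int.mod (PySem.Int.floordiv n 2) 2 = 0
       then 1 else 0) + groupedBits_alt (PySem.Int.floordiv n 2) := by
  unfold groupedBits_alt
  conv_lhs => rw [altLoop]
  rw [if_neg (show ¬n = 0 by omega), if_neg (show ¬n < 0 by omega), altLoop_acc]
  have em : PySem.Int.mod n 2 = n % 2 := PySem.Int.mod_eq_emod_of_pos (by omega)
  rw [em]
  have h1 : n % 2 = 0 ∨ n % 2 = 1 := by omega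
  rcases h1 with h1 | h1 <;> rw [h1] <;> split_ifs <;> simp_all

theorem main_eq (n : Int) (h : 0 ≤ n) : groupedBits n = groupedBits_alt n := by
  have key : ∀ k : Nat, ∀ n : Int, 0 ≤ n → n.toNat = k →
      groupedBits n = groupedBits_alt n := by
    intro k
    induction k using Nat.strong_induction_on with
    | _ k ih =>
      intro n h0 hk
      by_cases hz : n = 0
      · subst hz
        have hd : decToBin 0 = ['0'] := by rw [decToBin]; norm_num
        simp [groupedBits, groupedBits_alt, altLoop_zero 0 (Or.inl rfl)]
      by_cases ho : n = 1
      · subst ho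
        rw [groupedBits_pos 1 (by omega), B_rec 1 (by omega)]
        have hd : decToBin 1 = ['1'] := by rw [decToBin]; norm_num
        have e1 : PySem.Int.mod (1 : Int) 2 = 1 := by
          rw [PySem.Int.mod_eq_emod_of_pos (by omega)]; decide
        have e2 : PySem.Int.floordiv (1 : Int) 2 = 0 := by
          rw [PySem.Int.floordiv_eq_ediv_of_pos (by omega)]; decide
        have e3 : PySem.Int.mod (0 : Int) 2 = 0 := by
          rw [PySem.Int.mod_eq_emod_of_pos (by omega)]; decide
        rw [hd, e1, e2, e3]
        simp [aLoop, groupedBits_alt, altLoop_zero 0 (Or.inl rfl)]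
      have h2 : 2 ≤ n := by omega
      have hm0 : 0 ≤ PySem.Int.floordiv n 2 := by
        rw [PySem.Int.floordiv_eq_ediv_of_pos (by omega)]; omega
      have hlt : (PySem.Int.floordiv n 2).toNat < k := by
        rw [PySem.Int.floordiv_eq_ediv_of_pos (by omega)]; omega
      rw [A_rec n h2, B_rec n (by omega), ih _ hlt _ hm0 rfl]
      ring
  exact key n.toNat n h rfl

-- ===== VERDICT (by name: the statement is the Claim_ definition above) =====
theorem groupedBits_spec : Claim_equal_groupedBits := by
  intro n _ hpre
  unfold Spec_groupedBits
  exact main_eq n hpre
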